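-- pv_equiv track=rewrite | github.com/d0nk3yhm/pbix-mcp | src/pbix_mcp/formats/vertipaq_encoder.py | _bitpack_values
-- ===== SOURCE A (Python) =====
-- import math
--
-- def _bitpack_values(values: list[int], bit_width: int) -> list[int]:
--     """
--     Pack a list of integer values into uint64 words using bit_width bits each.
--
--     Each uint64 holds (64 // bit_width) values, packed from LSB to MSB.
--     """
--     if not values:
--         return []
--
--     if bit_width == 0:
--         # Special case: all values are 0, return a single zero uint64
--         return [0]
--
--     values_per_word = 64 // bit_width
--     mask = (1 << bit_width) - 1
--     n_words = math.ceil(len(values) / values_per_word)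
--
--     result = []
--     vi = 0
--     for _ in range(n_words):
--         word = 0
--         for bit_pos_idx in range(values_per_word):
--             if vi < len(values):
--                 word |= (values[vi] & mask) << (bit_pos_idx * bit_width)
--                 vi += 1
--         result.append(word)
--
--     return result
-- ===== SOURCE B (Python) =====
-- def _bitpack_values(values: list[int], bit_width: int) -> list[int]:
--     """Pack integers into uint64 words by bit-width: slice the input into
--     chunks of 64 // bit_width values and pack each chunk independently."""
--     if not values:
--         return []
--     if bit_width == 0:
--         return [0]
--     values_per_word = 64 // bit_width
--     mask = (1 << bit_width) - 1
--
--     def pack_word(chunk):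
--         word = 0
--         for j, v in enumerate(chunk):
--             word |= (v & mask) << (j * bit_width)
--         return word
--
--     return [pack_word(values[i:i + values_per_word])
--             for i in range(0, len(values), values_per_word)]
-- ===== Notes on version B (the rewrite author's own statement) =====
-- stated objective: simpler
-- what changed: A's nested word/slot loops with a running value counter and an in-bounds guard are replaced by slicing the input into chunks of 64 // bit_width values and packing each chunk independently with an enumerate fold; the ceil word count, the counter and the bounds check disappear.
import Mathlib
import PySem

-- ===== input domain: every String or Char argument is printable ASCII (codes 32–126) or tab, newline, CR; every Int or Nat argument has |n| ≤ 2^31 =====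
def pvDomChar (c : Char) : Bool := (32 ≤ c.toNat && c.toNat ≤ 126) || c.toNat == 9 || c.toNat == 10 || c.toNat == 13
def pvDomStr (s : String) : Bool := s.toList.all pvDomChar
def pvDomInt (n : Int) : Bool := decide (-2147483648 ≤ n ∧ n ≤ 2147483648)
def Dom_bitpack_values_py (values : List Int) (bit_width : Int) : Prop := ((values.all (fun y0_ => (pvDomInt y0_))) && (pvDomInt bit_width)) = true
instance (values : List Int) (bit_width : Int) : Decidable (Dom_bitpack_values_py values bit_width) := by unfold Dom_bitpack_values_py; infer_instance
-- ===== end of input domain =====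

-- B replaces A's nested word/slot loops with running counter and bounds guard by
-- slicing the input into chunks and packing each chunk independently (simpler decomposition).

-- ===== PORT A =====
-- `x << k` on Int with k : Nat is `x * 2 ^ k` (exact; Python raises only for negative k,
-- excluded by Pre_); `&` / `|` are PySem.Int.band / bor (Python-exact on negatives);
-- math.ceil(len/vpw) is ported as exact ceiling division -((-len) // vpw) (equal to the
-- float computation for every list length below 2^52).
def bitpack_values_py (values : List Int) (bit_width : Int) : List Int :=
  if values = [] then []
  else if bit_width = 0 then [0]
  else
    let values_per_word : Int := PySem.Int.floordiv 64 bit_width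
    let mask : Int := 1 * 2 ^ bit_width.toNat - 1
    let n_words : Int := -(PySem.Int.floordiv (-(values.length : Int)) values_per_word)
    let st :=
      (List.range n_words.toNat).foldl
        (fun (st : List Int × Nat) _ =>
          let inner :=
            (List.range values_per_word.toNat).foldl
              (fun (st2 : Int × Nat) bit_pos_idx =>
                if st2.2 < values.length then
                  (PySem.Int.bor st2.1
                     (PySem.Int.band (values.getD st2.2 0) mask * 2 ^ (bit_pos_idx * bit_width.toNat)),
                   st2.2 + 1)
                else st2)
              (0, st.2)
          (st.1 ++ [inner.1], inner.2))
        ([], 0)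
    st.1

-- ===== PORT B =====
def pvPackWord (mask : Int) (bwn : Nat) (chunk : List Int) : Int :=
  (PySem.List.enumerate chunk).foldl
    (fun word jv => PySem.Int.bor word (PySem.Int.band jv.2 mask * 2 ^ (jv.1.toNat * bwn))) 0

def bitpack_values_py_alt (values : List Int) (bit_width : Int) : List Int :=
  if values = [] then []
  else if bit_width = 0 then [0]
  else
    let values_per_word : Int := PySem.Int.floordiv 64 bit_width
    let mask : Int := 1 * 2 ^ bit_width.toNat - 1
    (PySem.List.pyRange 0 (values.length : Int) values_per_word).map
      (fun i => pvPackWord mask bit_width.toNat (PySem.List.slice values (some i) (some (i + values_per_word))))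

-- ===== PRECONDITION & SPEC =====
-- Exactly where A returns: for a nonempty list and bit_width ≠ 0, Python raises
-- ValueError (1 << negative) for bit_width < 0 and ZeroDivisionError (64 // bit_width = 0
-- in math.ceil) for bit_width > 64.
def Pre_bitpack_values_py (values : List Int) (bit_width : Int) : Prop :=
  values = [] ∨ bit_width = 0 ∨ (1 ≤ bit_width ∧ bit_width ≤ 64)
instance (values : List Int) (bit_width : Int) : Decidable (Pre_bitpack_values_py values bit_width) := by unfold Pre_bitpack_values_py; infer_instance
def pvWitness_bitpack_values_py : List Int × Int := ([3, 5, 2, 7, 1], 3)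

def Spec_bitpack_values_py (values : List Int) (bit_width : Int) (out : List Int) : Prop := out = bitpack_values_py_alt values bit_width
instance (values : List Int) (bit_width : Int) (out : List Int) : Decidable (Spec_bitpack_values_py values bit_width out) := by unfold Spec_bitpack_values_py; infer_instance

-- ===== CLAIM (what is proved, stated in full; the proofs are below) =====
def Claim_equal_bitpack_values_py : Prop := ∀ (values : List Int) (bit_width : Int), Dom_bitpack_values_py values bit_width → Pre_bitpack_values_py values bit_width → Spec_bitpack_values_py values bit_width (bitpack_values_py values bit_width)

-- ===== LEMMAS AND PROOFS =====

theorem pv_enum_append {α : Type} (l : List α) (x : α) : ∀ (s : Int),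
    PySem.List.enumerate (l ++ [x]) s = PySem.List.enumerate l s ++ [((s + l.length : Int), x)] := by
  induction l with
  | nil => intro s; simp [PySem.List.enumerate_nil, PySem.List.enumerate_cons]
  | cons y ys ih =>
      intro s
      simp only [List.cons_append, PySem.List.enumerate_cons, ih (s + 1), List.length_cons]
      push_cast; ring_nf

theorem pv_pack_append (M : Int) (bwn : Nat) (l : List Int) (x : Int) :
    pvPackWord M bwn (l ++ [x])
      = PySem.Int.bor (pvPackWord M bwn l) (PySem.Int.band x M * 2 ^ (l.length * bwn)) := by
  simp [pvPackWord, pv_enum_append l x 0, List.foldl_append]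

theorem pv_inner_loop (values : List Int) (M : Int) (bwn : Nat) (vi : Nat) (hvi : vi ≤ values.length) :
    ∀ (V : Nat),
    (List.range V).foldl
      (fun (st2 : Int × Nat) j =>
        if st2.2 < values.length then
          (PySem.Int.bor st2.1 (PySem.Int.band (values.getD st2.2 0) M * 2 ^ (j * bwn)), st2.2 + 1)
        else st2) (0, vi)
    = (pvPackWord M bwn ((values.drop vi).take V), min values.length (vi + V)) := by
  intro V
  induction V with
  | zero => simp [pvPackWord, PySem.List.enumerate_nil, Nat.min_eq_right hvi]
  | succ V ih =>
      rw [List.range_succ, List.foldl_append, ih]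
      by_cases h : vi + V < values.length
      · have hmin : min values.length (vi + V) = vi + V := by omega
        have hlen : ((values.drop vi).take V).length = V := by
          simp [List.length_take, List.length_drop]; omega
        have htake : (values.drop vi).take (V + 1)
            = (values.drop vi).take V ++ [values[vi + V]] := by
          rw [List.take_add_one]
          congr 1
          have : (values.drop vi)[V]? = values[vi + V]? := by
            rw [List.getElem?_drop]
          simp [this, List.getElem?_eq_getElem h]
        simp only [List.foldl_cons, List.foldl_nil, hmin]
        rw [if_pos h, htake, pv_pack_append, hlen]
        have : values.getD (vi + V) 0 = values[vi + V] := List.getD_eq_getElem values 0 h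
        rw [this]
        simp only [Prod.mk.injEq]
        exact ⟨trivial, by omega⟩
      · have hmin : min values.length (vi + V) = values.length := by omega
        have htake : (values.drop vi).take (V + 1) = (values.drop vi).take V := by
          rw [List.take_of_length_le, List.take_of_length_le] <;>
            simp [List.length_drop] <;> omega
        simp only [List.foldl_cons, List.foldl_nil, hmin]
        rw [if_neg (by omega), htake]
        simp only [Prod.mk.injEq]
        exact ⟨trivial, by omega⟩

theorem pv_outer_loop (values : List Int) (M : Int) (bwn V : Nat) :
    ∀ (n : Nat) (acc : List Int) (vi : Nat), vi ≤ values.length →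
    (List.range n).foldl
      (fun (st : List Int × Nat) _ =>
        let inner :=
          (List.range V).foldl
            (fun (st2 : Int × Nat) j =>
              if st2.2 < values.length then
                (PySem.Int.bor st2.1 (PySem.Int.band (values.getD st2.2 0) M * 2 ^ (j * bwn)), st2.2 + 1)
              else st2) (0, st.2)
        (st.1 ++ [inner.1], inner.2)) (acc, vi)
    = (acc ++ (List.range n).map (fun k => pvPackWord M bwn ((values.drop (vi + k * V)).take V)),
       min values.length (vi + n * V)) := by
  intro n
  induction n with
  | zero => intro acc vi hvi; simp [Nat.min_eq_right hvi]
  | succ n ih =>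
      intro acc vi hvi
      rw [List.range_succ, List.foldl_append, ih acc vi hvi]
      simp only [List.foldl_cons, List.foldl_nil]
      rw [pv_inner_loop values M bwn _ (by omega)]
      have hdrop : (values.drop (min values.length (vi + n * V))).take V
          = (values.drop (vi + n * V)).take V := by
        by_cases h : vi + n * V ≤ values.length
        · rw [Nat.min_eq_right h]
        · rw [Nat.min_eq_left (by omega), List.drop_of_length_le (le_refl _),
              List.drop_of_length_le (by omega)]
      simp only [List.map_append, List.map_cons, List.map_nil, Prod.mk.injEq]
      have hnV : (n + 1) * V = n * V + V := by ring
      refine ⟨?_, by omega⟩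
      rw [hdrop, List.append_assoc]

-- ===== VERDICT (by name: the statement is the Claim_ definition above) =====
theorem bitpack_values_py_spec : Claim_equal_bitpack_values_py := by
  intro values bw _ hpre
  unfold Spec_bitpack_values_py
  by_cases hnil : values = []
  · simp [bitpack_values_py, bitpack_values_py_alt, hnil]
  · by_cases h0 : bw = 0
    · simp [bitpack_values_py, bitpack_values_py_alt, hnil, h0]
    · have hbw : (1:Int) ≤ bw ∧ bw ≤ 64 := by
        rcases hpre with h | h | h
        · exact absurd h hnil
        · exact absurd h h0
        · exact h
      have hbwpos : (0:Int) < bw := by omega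
      have hVz : (0:Int) < PySem.Int.floordiv 64 bw := by
        rw [PySem.Int.floordiv_eq_ediv_of_pos hbwpos]
        have : (1:Int) ≤ 64 / bw := by
          rw [Int.le_ediv_iff_mul_le hbwpos]; omega
        omega
      set Vz : Int := PySem.Int.floordiv 64 bw with hVzdef
      set V : Nat := Vz.toNat with hVdef
      have hVzV : Vz = (V : Int) := by omega
      have hLpos : 0 < values.length := List.length_pos_iff.mpr hnil
      simp only [bitpack_values_py, bitpack_values_py_alt, if_neg hnil, if_neg h0]
      rw [pv_outer_loop values (1 * 2 ^ bw.toNat - 1) bw.toNat V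
            ((-(PySem.Int.floordiv (-(values.length : Int)) Vz)).toNat) [] 0 (by omega)]
      rw [PySem.List.pyRange_of_pos 0 (values.length : Int) hVz,
          if_pos (by exact_mod_cast hLpos), List.map_map]
      have hq : -(PySem.Int.floordiv (-(values.length : Int)) Vz)
          = ((values.length : Int) - 0 + Vz - 1) / Vz := by
        rw [PySem.Int.neg_floordiv_neg_eq_iff_of_pos hVz]
        have h := Int.mul_ediv_add_emod ((values.length : Int) - 0 + Vz - 1) Vz
        have h1 := Int.emod_nonneg ((values.length : Int) - 0 + Vz - 1) (by omega : Vz ≠ 0)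
        have h2 := Int.emod_lt_of_pos ((values.length : Int) - 0 + Vz - 1) hVz
        constructor <;> nlinarith [h, h1, h2]
      rw [hq]
      simp only [List.nil_append]
      apply List.map_congr_left
      intro k hk
      simp only [Function.comp]
      have e1 : (0 : Int) + Vz * (k : Int) = ((V * k : Nat) : Int) := by
        rw [hVzV]; push_cast; ring
      have e2 : (0 : Int) + Vz * (k : Int) + Vz = ((V * k : Nat) : Int) + ((V : Nat) : Int) := by
        rw [hVzV]; push_cast; ring
      rw [e2, e1, PySem.List.slice_natCast_add]
      rw [Nat.zero_add, Nat.mul_comm]
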